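-- pv_equiv track=rewrite | github.com/dominic-triolo/social_analyzer_mvp_2 | tasks.py | _extract_contact_details
-- ===== SOURCE A (Python) =====
-- def _extract_contact_details(contact_details):
--     """Extract and format contact details - handles duplicates by taking first occurrence"""
--     contacts = {}
--
--     for detail in contact_details:
--         contact_type = detail.get('type', '').lower()
--         contact_value = detail.get('value', '')
--
--         if contact_type and contact_value:
--             # Only set if not already set (takes first occurrence)
--             if contact_type not in contacts:
--                 contacts[contact_type] = contact_value
--
--     return contacts
-- ===== SOURCE B (Python) =====
-- def _extract_contact_details(contact_details):
--     """Staged pipeline: normalize every entry to a (type, value) pair, keep the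
--     valid ones, list the distinct types in order of first appearance, and map
--     each type to the value of its first valid entry."""
--     pairs = [(d.get('type', '').lower(), d.get('value', '')) for d in contact_details]
--     pairs = [(t, v) for t, v in pairs if t and v]
--     order = dict.fromkeys(t for t, _ in pairs)
--     return {t: next(v for u, v in pairs if u == t) for t in order}
-- ===== Notes on version B (the rewrite author's own statement) =====
-- stated objective: alternative
-- what changed: B replaces A's single fold over a membership-guarded dict by a staged pipeline: normalize to (type, value) pairs, filter the valid ones, dedupe the types in first-appearance order with dict.fromkeys, then look up each type's first value.
import Mathlib
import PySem

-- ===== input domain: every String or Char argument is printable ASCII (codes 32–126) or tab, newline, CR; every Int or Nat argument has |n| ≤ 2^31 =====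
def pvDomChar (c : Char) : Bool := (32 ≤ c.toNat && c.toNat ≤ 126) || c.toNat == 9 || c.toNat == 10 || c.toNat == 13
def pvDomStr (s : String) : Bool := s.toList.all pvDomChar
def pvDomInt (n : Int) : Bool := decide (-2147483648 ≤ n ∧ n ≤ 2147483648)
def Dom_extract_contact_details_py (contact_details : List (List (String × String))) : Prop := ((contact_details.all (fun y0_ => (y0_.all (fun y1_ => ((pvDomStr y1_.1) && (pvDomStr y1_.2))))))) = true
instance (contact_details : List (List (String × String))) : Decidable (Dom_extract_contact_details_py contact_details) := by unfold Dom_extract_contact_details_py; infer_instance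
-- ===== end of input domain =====

-- B is a staged pipeline (normalize → filter valid pairs → dedupe types → first-value lookup)
-- instead of A's single fold over a membership-guarded dict; objective: alternative.

-- ===== PORT A =====
-- one iteration of A's loop body
def pvStepA (contacts : PySem.Dict String String) (detail : List (String × String)) : PySem.Dict String String :=
  let contact_type := PySem.Str.lower ((PySem.Dict.mk detail).getD "type" "")
  let contact_value := (PySem.Dict.mk detail).getD "value" ""
  if contact_type ≠ "" ∧ contact_value ≠ "" then
    if contacts.contains contact_type = false then contacts.insert contact_type contact_value
    else contacts
  else contacts

def extract_contact_details_py (contact_details : List (List (String × String))) : List (String × String) :=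
  (contact_details.foldl pvStepA PySem.Dict.empty).items

-- ===== PORT B =====
-- (d.get('type', '').lower(), d.get('value', ''))
def pvNorm (detail : List (String × String)) : String × String :=
  (PySem.Str.lower ((PySem.Dict.mk detail).getD "type" ""), (PySem.Dict.mk detail).getD "value" "")

-- next(v for u, v in pairs if u == t); the none branch is Python's StopIteration,
-- unreachable because every t handed to it is a key occurring in pairs
def pvFirstVal (pairs : List (String × String)) (t : String) : String :=
  match pairs.find? (fun p => p.1 == t) with
  | some p => p.2
  | none => ""

def extract_contact_details_py_alt (contact_details : List (List (String × String))) : List (String × String) :=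
  let pairs := (contact_details.map pvNorm).filter (fun p => p.1 != "" && p.2 != "")
  let order := PySem.List.dedup (pairs.map Prod.fst)   -- dict.fromkeys: first occurrences in order
  order.map (fun t => (t, pvFirstVal pairs t))

-- ===== PRECONDITION & SPEC =====
def Spec_extract_contact_details_py (contact_details : List (List (String × String))) (out : List (String × String)) : Prop := out = extract_contact_details_py_alt contact_details
instance (contact_details : List (List (String × String))) (out : List (String × String)) : Decidable (Spec_extract_contact_details_py contact_details out) := by unfold Spec_extract_contact_details_py; infer_instance

-- ===== CLAIM (what is proved, stated in full; the proofs are below) =====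
def Claim_equal_extract_contact_details_py : Prop := ∀ (contact_details : List (List (String × String))), Dom_extract_contact_details_py contact_details → Spec_extract_contact_details_py contact_details (extract_contact_details_py contact_details)

-- ===== LEMMAS AND PROOFS =====

-- A's loop, restricted to already-normalized valid pairs
def pvIns2 (d : PySem.Dict String String) (p : String × String) : PySem.Dict String String :=
  if d.contains p.1 = false then d.insert p.1 p.2 else d

-- first-occurrence keys of P not already present in d, tracking A's dict
def pvFkn (d : PySem.Dict String String) : List (String × String) → List String
  | [] => []
  | p :: rest => if d.contains p.1 then pvFkn d rest else p.1 :: pvFkn (d.insert p.1 p.2) rest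

-- first-occurrence dedupe of ks relative to a membership predicate
def pvDedupF (mem : String → Bool) : List String → List String
  | [] => []
  | t :: rest => if mem t then pvDedupF mem rest else t :: pvDedupF (fun s => s == t || mem s) rest

lemma pvMem_fkn (d : PySem.Dict String String) (P : List (String × String)) (s : String)
    (h : s ∈ pvFkn d P) : d.contains s = false := by
  induction P generalizing d with
  | nil => simp [pvFkn] at h
  | cons p rest ih =>
    simp only [pvFkn] at h
    by_cases hc : d.contains p.1 = true
    · rw [if_pos hc] at h; exact ih d h
    · rw [if_neg hc] at h
      rcases List.mem_cons.1 h with rfl | h2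
      · simpa using hc
      · have := ih (d.insert p.1 p.2) h2
        rw [PySem.Dict.contains_insert] at this
        exact (Bool.or_eq_false_iff.1 this).2

lemma pvLoop_items (P : List (String × String)) (d : PySem.Dict String String) :
    (P.foldl pvIns2 d).items
      = d.items ++ (pvFkn d P).map (fun t => (t, pvFirstVal P t)) := by
  induction P generalizing d with
  | nil => simp [pvFkn]
  | cons p rest ih =>
    obtain ⟨t, v⟩ := p
    simp only [List.foldl_cons, pvFkn]
    by_cases hc : d.contains t = true
    · have h2 : pvIns2 d (t, v) = d := by simp [pvIns2, hc]
      rw [h2, ih, if_pos hc]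
      congr 1
      apply List.map_congr_left
      intro s hs
      have hne : s ≠ t := by
        have := pvMem_fkn d rest s hs
        intro he; rw [he, hc] at this; cases this
      simp [pvFirstVal, Ne.symm hne]
    · have hcf : d.contains t = false := by revert hc; cases d.contains t <;> simp
      have h2 : pvIns2 d (t, v) = d.insert t v := by simp [pvIns2, hcf]
      rw [h2, ih, if_neg hc, PySem.Dict.items_insert_of_not_contains _ _ hcf]
      simp only [List.map_cons, List.append_assoc, List.cons_append, List.nil_append]
      congr 2
      · simp [pvFirstVal]
      · apply List.map_congr_left
        intro s hs
        have hne : s ≠ t := by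
          have := pvMem_fkn (d.insert t v) rest s hs
          rw [PySem.Dict.contains_insert] at this
          intro he
          rw [he] at this; simp at this
        simp [pvFirstVal, Ne.symm hne]

lemma pvDedupF_congr (mem mem' : String → Bool) (h : ∀ s, mem s = mem' s) (ks : List String) :
    pvDedupF mem ks = pvDedupF mem' ks := by
  have : mem = mem' := funext h
  rw [this]

lemma pvFkn_eq_dedupF (P : List (String × String)) (d : PySem.Dict String String) :
    pvFkn d P = pvDedupF (fun t => d.contains t) (P.map Prod.fst) := by
  induction P generalizing d with
  | nil => simp [pvFkn, pvDedupF]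
  | cons p rest ih =>
    simp only [pvFkn, List.map_cons, pvDedupF]
    by_cases hc : d.contains p.1 = true
    · rw [if_pos hc, if_pos hc, ih]
    · rw [if_neg hc, if_neg hc, ih]
      congr 1
      apply pvDedupF_congr
      intro s
      rw [PySem.Dict.contains_insert]

lemma pvFoldl_add_eq (ks : List String) (acc : List String) :
    ks.foldl PySem.Set.add acc = acc ++ pvDedupF (fun t => acc.contains t) ks := by
  induction ks generalizing acc with
  | nil => simp [pvDedupF]
  | cons t rest ih =>
    simp only [List.foldl_cons, pvDedupF]
    by_cases hc : acc.contains t = true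
    · have : PySem.Set.add acc t = acc := by
        simp only [PySem.Set.add, PySem.Set.contains]
        rw [if_pos hc]
      rw [if_pos hc, this, ih]
    · have : PySem.Set.add acc t = acc ++ [t] := by
        simp only [PySem.Set.add, PySem.Set.contains]
        rw [if_neg hc]
      rw [if_neg hc, this, ih, List.append_assoc, List.singleton_append]
      congr 2
      apply pvDedupF_congr
      intro s
      by_cases h : s = t <;> simp [h, List.contains_eq_mem]

lemma pvDedup_eq_dedupF (ks : List String) :
    PySem.List.dedup ks = pvDedupF (fun _ => false) ks := by
  rw [PySem.List.dedup, PySem.Set.ofList_eq_foldl, pvFoldl_add_eq]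
  simp only [List.nil_append]
  apply pvDedupF_congr
  intro s
  simp [List.contains_eq_mem]

-- A's fold over the raw details equals the restricted fold over the valid normalized pairs
lemma pvFold_eq (cds : List (List (String × String))) (d : PySem.Dict String String) :
    cds.foldl pvStepA d
      = ((cds.map pvNorm).filter (fun p => p.1 != "" && p.2 != "")).foldl pvIns2 d := by
  rw [List.foldl_filter, List.foldl_map]
  have hstep : (fun (acc : PySem.Dict String String) (x : List (String × String)) =>
      if ((pvNorm x).1 != "" && (pvNorm x).2 != "") = true then pvIns2 acc (pvNorm x) else acc)
      = pvStepA := by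
    funext acc x
    simp only [pvStepA, pvIns2, pvNorm, Bool.and_eq_true, bne_iff_ne, ne_eq]
  rw [hstep]

-- ===== VERDICT (by name: the statement is the Claim_ definition above) =====
theorem extract_contact_details_py_spec : Claim_equal_extract_contact_details_py := by
  intro cds _
  unfold Spec_extract_contact_details_py
  rw [extract_contact_details_py, extract_contact_details_py_alt, pvFold_eq, pvLoop_items,
    pvFkn_eq_dedupF, pvDedup_eq_dedupF]
  simp only [PySem.Dict.empty, List.nil_append]
  congr 1
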